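-- pv_equiv track=rewrite | github.com/VIZQL/PythonProject | KakaoAPI/New_bot.py | determine_msg
-- ===== SOURCE A (Python) =====
-- def determine_msg(pre_result, result):
--
--     send_msg = ""
--     cmd = 0
--     new = 0
--
--     if len(result)>=1 and len(pre_result)>=1:
--         for i, contents in enumerate(result):
--             if pre_result[i] != result[i]:
--                 send_msg = result[i]
--                 new = 1
--                 if i == 0:
--                     cmd = 1
--
--     return send_msg, cmd, new
-- ===== SOURCE B (Python) =====
-- def determine_msg(pre_result, result):
--     if not result or not pre_result:
--         return "", 0, 0
--     # scan from the back: the first mismatch found this way is the last one overall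
--     for i in range(len(result) - 1, -1, -1):
--         if pre_result[i] != result[i]:
--             return result[i], (1 if pre_result[0] != result[0] else 0), 1
--     return "", 0, 0
-- ===== Notes on version B (the rewrite author's own statement) =====
-- stated objective: alternative
-- what changed: Replaces A's full forward pass that keeps overwriting (send_msg, cmd, new) with a backward scan that early-returns at the first mismatch seen from the end (A's last mismatch), computing cmd by a direct comparison at index 0; no mutable accumulators and no full traversal once a mismatch is found.
import Mathlib
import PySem

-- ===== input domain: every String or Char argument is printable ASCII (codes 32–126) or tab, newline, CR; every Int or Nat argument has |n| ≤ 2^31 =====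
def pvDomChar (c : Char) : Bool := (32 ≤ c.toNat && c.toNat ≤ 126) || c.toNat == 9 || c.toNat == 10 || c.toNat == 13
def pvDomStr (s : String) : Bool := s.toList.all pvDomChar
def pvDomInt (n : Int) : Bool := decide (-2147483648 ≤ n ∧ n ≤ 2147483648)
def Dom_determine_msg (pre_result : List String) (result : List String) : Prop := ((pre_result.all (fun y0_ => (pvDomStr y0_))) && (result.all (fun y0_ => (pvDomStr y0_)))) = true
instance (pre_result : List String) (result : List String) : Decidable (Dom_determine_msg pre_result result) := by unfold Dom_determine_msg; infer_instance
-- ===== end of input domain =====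

-- B replaces A's forward fused overwriting loop by a backward scan that early-returns at the first mismatch from the end (objective: alternative); equal return values on Pre_.

-- ===== PORT A =====
-- fused loop over enumerate(result), overwriting (send_msg, cmd, new) in place
def determine_msg (pre_result : List String) (result : List String) : String × Int × Int :=
  let init : String × Int × Int := ("", 0, 0)
  if 1 ≤ (result.length : Int) ∧ 1 ≤ (pre_result.length : Int) then
    (PySem.List.enumerate result 0).foldl
      (fun (st : String × Int × Int) p =>
        if PySem.List.pyGetD pre_result p.1 "" ≠ PySem.List.pyGetD result p.1 "" then
          (PySem.List.pyGetD result p.1 "", if p.1 = 0 then 1 else st.2.1, 1)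
        else st) init
  else init

-- ===== PORT B =====
-- the backward for-loop with early return, as structural recursion over range(len-1, -1, -1)
def detB_loop (pre_result : List String) (result : List String) : List Int → String × Int × Int
  | [] => ("", 0, 0)
  | i :: rest =>
      if PySem.List.pyGetD pre_result i "" ≠ PySem.List.pyGetD result i "" then
        (PySem.List.pyGetD result i "",
         if PySem.List.pyGetD pre_result 0 "" ≠ PySem.List.pyGetD result 0 "" then 1 else 0, 1)
      else detB_loop pre_result result rest

def determine_msg_alt (pre_result : List String) (result : List String) : String × Int × Int :=
  if result = [] ∨ pre_result = [] then ("", 0, 0)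
  else detB_loop pre_result result (PySem.List.pyRange ((result.length : Int) - 1) (-1) (-1))

-- ===== PRECONDITION & SPEC =====
-- Pre_ excludes exactly the inputs where the Python A raises IndexError:
-- both lists nonempty and result longer than pre_result (pre_result[i] out of range).
def Pre_determine_msg (pre_result : List String) (result : List String) : Prop :=
  result = [] ∨ pre_result = [] ∨ result.length ≤ pre_result.length
instance (pre_result : List String) (result : List String) : Decidable (Pre_determine_msg pre_result result) := by unfold Pre_determine_msg; infer_instance

def pvWitness_determine_msg : List String × List String := (["a", "b"], ["a", "c"])

def Spec_determine_msg (pre_result : List String) (result : List String) (out : String × Int × Int) : Prop := out = determine_msg_alt pre_result result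
instance (pre_result : List String) (result : List String) (out : String × Int × Int) : Decidable (Spec_determine_msg pre_result result out) := by unfold Spec_determine_msg; infer_instance

-- ===== CLAIM (what is proved, stated in full; the proofs are below) =====
def Claim_equal_determine_msg : Prop := ∀ (pre_result : List String) (result : List String), Dom_determine_msg pre_result result → Pre_determine_msg pre_result result → Spec_determine_msg pre_result result (determine_msg pre_result result)

-- ===== LEMMAS AND PROOFS =====

-- the fold of A's step, characterised by the filtered index list
theorem foldl_step_eq (f : Int → Prop) [DecidablePred f] (g : Int → String)
    (l : List (Int × String)) (st : String × Int × Int) :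
    l.foldl (fun (st : String × Int × Int) p =>
        if f p.1 then (g p.1, if p.1 = 0 then 1 else st.2.1, 1) else st) st
      = match (l.map (·.1)).filter (fun i => decide (f i)) with
        | [] => st
        | i0 :: rest => (g ((i0 :: rest).getLast (by simp)),
            if 0 ∈ (i0 :: rest) then 1 else st.2.1, 1) := by
  induction l generalizing st with
  | nil => simp
  | cons p l ih =>
    simp only [List.foldl_cons, List.map_cons, List.filter_cons]
    by_cases hf : f p.1
    · simp only [hf, decide_true, if_pos]
      rw [ih]
      cases hds : (l.map (·.1)).filter (fun i => decide (f i)) with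
      | nil => simp [eq_comm]
      | cons j rest =>
        by_cases h0 : (0 : Int) ∈ j :: rest <;> by_cases hp0 : p.1 = 0 <;>
          simp [h0, hp0, List.getLast_cons, eq_comm]
    · simp only [hf, decide_false, ite_false, Bool.false_eq_true]
      exact ih st

-- B's early-return loop, characterised by the filtered index list (it returns on the FIRST match)
theorem detB_loop_eq (pre_result result : List String) (l : List Int) :
    detB_loop pre_result result l
      = match l.filter (fun i => decide (PySem.List.pyGetD pre_result i "" ≠ PySem.List.pyGetD result i "")) with
        | [] => ("", 0, 0)
        | j :: _ => (PySem.List.pyGetD result j "",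
            if PySem.List.pyGetD pre_result 0 "" ≠ PySem.List.pyGetD result 0 "" then 1 else 0, 1) := by
  induction l with
  | nil => simp [detB_loop]
  | cons i rest ih =>
    simp only [detB_loop, List.filter_cons]
    by_cases hf : PySem.List.pyGetD pre_result i "" ≠ PySem.List.pyGetD result i ""
    · simp [hf]
    · simp [hf, ih]

-- the filtered range is nonneg and strictly increasing, so 0 is a member iff it is the head
theorem zero_mem_filter_range {n : Nat} {f : Int → Bool} {i0 : Int} {rest : List Int}
    (h : (PySem.List.pyRange 0 (n : Int) 1).filter f = i0 :: rest) :
    ((0 : Int) ∈ i0 :: rest) ↔ i0 = 0 := by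
  have hpw : (i0 :: rest).Pairwise (· < ·) := by
    rw [← h]; exact (PySem.List.pairwise_lt_pyRange_one 0 n).filter f
  have hsub : ∀ x ∈ i0 :: rest, (0 : Int) ≤ x := by
    intro x hx
    have hx' : x ∈ (PySem.List.pyRange 0 (n : Int) 1).filter f := h ▸ hx
    have := (PySem.List.mem_pyRange_one).mp (List.mem_of_mem_filter hx')
    omega
  constructor
  · intro h0
    rcases List.mem_cons.mp h0 with h0 | h0
    · omega
    · have h1 := (List.pairwise_cons.mp hpw).1 0 h0
      have h2 := hsub i0 List.mem_cons_self
      omega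
  · intro h0; simp [h0]

-- under a nonempty filter over range(0,n), the head is 0 iff index 0 itself differs
theorem head_zero_iff {pre_result result : List String} {n : Nat} (hn : 0 < n)
    {i0 : Int} {rest : List Int}
    (h : (PySem.List.pyRange 0 (n : Int) 1).filter
        (fun i => decide (PySem.List.pyGetD pre_result i "" ≠ PySem.List.pyGetD result i "")) = i0 :: rest) :
    (i0 = 0) ↔ PySem.List.pyGetD pre_result 0 "" ≠ PySem.List.pyGetD result 0 "" := by
  constructor
  · intro h0
    have : i0 ∈ (PySem.List.pyRange 0 (n : Int) 1).filter
        (fun i => decide (PySem.List.pyGetD pre_result i "" ≠ PySem.List.pyGetD result i "")) := by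
      rw [h]; exact List.mem_cons_self
    have := List.of_mem_filter this
    simpa [h0] using this
  · intro hf
    have hmem : (0 : Int) ∈ (PySem.List.pyRange 0 (n : Int) 1).filter
        (fun i => decide (PySem.List.pyGetD pre_result i "" ≠ PySem.List.pyGetD result i "")) := by
      apply List.mem_filter.mpr
      refine ⟨PySem.List.mem_pyRange_one.mpr ⟨le_refl 0, by exact_mod_cast hn⟩, by simpa using hf⟩
    rw [h] at hmem
    exact (zero_mem_filter_range h).mp hmem

theorem determine_msg_eq_alt (pre_result result : List String) :
    determine_msg pre_result result = determine_msg_alt pre_result result := by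
  unfold determine_msg determine_msg_alt
  by_cases hr : result = []
  · simp [hr]
  by_cases hp : pre_result = []
  · simp [hp]
  · have h1 : 0 < result.length := List.length_pos_iff.mpr hr
    have h2 : 0 < pre_result.length := List.length_pos_iff.mpr hp
    have hg : (1 ≤ (result.length : Int) ∧ 1 ≤ (pre_result.length : Int)) :=
      ⟨by exact_mod_cast h1, by exact_mod_cast h2⟩
    rw [if_pos hg, if_neg (by simp [hr, hp])]
    rw [foldl_step_eq
      (fun i => PySem.List.pyGetD pre_result i "" ≠ PySem.List.pyGetD result i "")
      (fun i => PySem.List.pyGetD result i "")]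
    rw [PySem.List.map_fst_enumerate]
    simp only [Int.zero_add]
    -- B's countdown range is the reverse of A's enumerate index range
    have hrev : PySem.List.pyRange ((result.length : Int) - 1) (-1) (-1)
        = (PySem.List.pyRange 0 (result.length : Int) 1).reverse := by
      rw [PySem.List.pyRange_neg_one_eq_reverse]
      norm_num
    rw [detB_loop_eq, hrev, List.filter_reverse]
    cases hds : (PySem.List.pyRange 0 (result.length : Int) 1).filter
        (fun i => decide (PySem.List.pyGetD pre_result i "" ≠ PySem.List.pyGetD result i "")) with
    | nil => simp
    | cons i0 rest =>
      have hne : (i0 :: rest).reverse ≠ [] := by simp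
      rw [List.reverse_cons]
      cases hrr : rest.reverse ++ [i0] with
      | nil => simp at hrr
      | cons j tl =>
        simp only
        have hj : (i0 :: rest).getLast (by simp) = j := by
          have h3 : (i0 :: rest).reverse.head? = some j := by
            rw [List.reverse_cons, hrr]; rfl
          rw [List.head?_reverse, List.getLast?_eq_some_getLast (by simp)] at h3
          exact Option.some.inj h3
        rw [← hj, if_congr (zero_mem_filter_range hds) rfl rfl,
            if_congr (head_zero_iff h1 hds) rfl rfl]

-- ===== VERDICT (by name: the statement is the Claim_ definition above) =====
theorem determine_msg_spec : Claim_equal_determine_msg := by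
  intro pre_result result _ _
  unfold Spec_determine_msg
  exact determine_msg_eq_alt pre_result result
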